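-- pv_equiv track=rewrite | github.com/mikefullerton/agentic-interview-team | plugins/dev-team/scripts/arbitrator/markdown/_lib.py | parse_flags
-- ===== SOURCE A (Python) =====
-- def parse_flags(argv: list[str]) -> dict[str, str]:
--     """Parse --flag value pairs from argv into a dict."""
--     flags: dict[str, str] = {}
--     flag_map = {
--         "--session": "session",
--         "--specialist": "specialist",
--         "--type": "type",
--         "--state": "state",
--         "--changed-by": "changed_by",
--         "--description": "description",
--         "--content": "content",
--         "--category": "category",
--         "--severity": "severity",
--         "--title": "title",
--         "--detail": "detail",
--         "--playbook": "playbook",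
--         "--team-lead": "team_lead",
--         "--user": "user",
--         "--machine": "machine",
--         "--path": "path",
--         "--result": "result",
--         "--finding": "finding",
--         "--message": "message",
--         "--artifact": "artifact",
--         "--interpretation": "interpretation",
--         "--option-text": "option_text",
--         "--is-default": "is_default",
--         "--sort-order": "sort_order",
--         "--reason": "reason",
--         "--status": "status",
--         "--team": "team",
--         "--iteration": "iteration",
--         "--verifier-feedback": "verifier_feedback",
--     }
--     i = 0
--     while i < len(argv):
--         arg = argv[i]
--         if arg in flag_map and i + 1 < len(argv):
--             flags[flag_map[arg]] = argv[i + 1]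
--             i += 2
--         else:
--             i += 1
--     return flags
-- ===== SOURCE B (Python) =====
-- KNOWN_FLAGS = frozenset([
--     "--session", "--specialist", "--type", "--state", "--changed-by",
--     "--description", "--content", "--category", "--severity", "--title",
--     "--detail", "--playbook", "--team-lead", "--user", "--machine",
--     "--path", "--result", "--finding", "--message", "--artifact",
--     "--interpretation", "--option-text", "--is-default", "--sort-order",
--     "--reason", "--status", "--team", "--iteration", "--verifier-feedback",
-- ])
--
--
-- def parse_flags(argv: list[str]) -> dict[str, str]:
--     """Parse --flag value pairs from argv into a dict."""
--     flags: dict[str, str] = {}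
--     pending = None
--     for tok in argv:
--         if pending is not None:
--             flags[pending] = tok
--             pending = None
--         elif tok in KNOWN_FLAGS:
--             # the dict key is the flag name itself: strip "--", '-' -> '_'
--             pending = tok[2:].replace("-", "_")
--     return flags
-- ===== Notes on version B (the rewrite author's own statement) =====
-- stated objective: simpler
-- what changed: Replaces A's index-based while loop with +1/+2 jumps and its 29-entry flag->name dict by a single for-loop carrying a pending-key state variable over a frozenset of known flags, computing each dict key from the flag itself (strip '--', '-' -> '_') instead of looking it up.
import Mathlib
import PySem

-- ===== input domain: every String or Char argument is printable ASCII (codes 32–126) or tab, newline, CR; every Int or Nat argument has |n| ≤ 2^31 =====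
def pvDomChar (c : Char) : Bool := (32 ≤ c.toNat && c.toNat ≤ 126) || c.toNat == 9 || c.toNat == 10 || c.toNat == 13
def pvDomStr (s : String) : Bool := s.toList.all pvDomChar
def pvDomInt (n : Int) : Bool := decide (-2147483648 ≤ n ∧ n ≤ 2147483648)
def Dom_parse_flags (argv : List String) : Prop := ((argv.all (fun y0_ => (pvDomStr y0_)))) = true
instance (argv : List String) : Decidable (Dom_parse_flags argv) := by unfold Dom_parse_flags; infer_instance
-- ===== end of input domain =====

-- B drops A's index-based while loop (+1/+2 jumps) and its flag->name dict: it is a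
-- single pass carrying a pending-key state, recognising flags by membership in a set
-- and deriving each key from the flag text itself; objective: simpler.

-- ===== PORT A =====
-- A's flag_map dict literal.
def pvPairs : List (String × String) := [
  ("--session", "session"),
  ("--specialist", "specialist"),
  ("--type", "type"),
  ("--state", "state"),
  ("--changed-by", "changed_by"),
  ("--description", "description"),
  ("--content", "content"),
  ("--category", "category"),
  ("--severity", "severity"),
  ("--title", "title"),
  ("--detail", "detail"),
  ("--playbook", "playbook"),
  ("--team-lead", "team_lead"),
  ("--user", "user"),
  ("--machine", "machine"),
  ("--path", "path"),
  ("--result", "result"),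
  ("--finding", "finding"),
  ("--message", "message"),
  ("--artifact", "artifact"),
  ("--interpretation", "interpretation"),
  ("--option-text", "option_text"),
  ("--is-default", "is_default"),
  ("--sort-order", "sort_order"),
  ("--reason", "reason"),
  ("--status", "status"),
  ("--team", "team"),
  ("--iteration", "iteration"),
  ("--verifier-feedback", "verifier_feedback")
]

def pvFlagMap : PySem.Dict String String := PySem.Dict.ofList pvPairs

-- A's while loop: at index i the remaining suffix is matched; 'i += 2' drops two
-- elements, 'i += 1' drops one.
def pvALoop : List String → PySem.Dict String String → PySem.Dict String String
  | [], flags => flags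
  | [_], flags => flags        -- last iteration: arg not in flag_map or i+1 = len(argv); i += 1, loop ends
  | arg :: v :: rest, flags =>
    match pvFlagMap.get? arg with
    | some key => pvALoop rest (flags.insert key v)   -- arg in flag_map and i+1 < len: consume pair, i += 2
    | none => pvALoop (v :: rest) flags               -- i += 1

def parse_flags (argv : List String) : List (String × String) :=
  (pvALoop argv PySem.Dict.empty).items

-- ===== PORT B =====
-- B's KNOWN_FLAGS set literal.
def pvKnownFlags : PySem.Set String := PySem.Set.ofList [
  "--session", "--specialist", "--type", "--state", "--changed-by",
  "--description", "--content", "--category", "--severity", "--title",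
  "--detail", "--playbook", "--team-lead", "--user", "--machine",
  "--path", "--result", "--finding", "--message", "--artifact",
  "--interpretation", "--option-text", "--is-default", "--sort-order",
  "--reason", "--status", "--team", "--iteration", "--verifier-feedback"
]

-- tok[2:].replace("-", "_")
def pvKeyOf (tok : String) : String :=
  PySem.Str.replace (PySem.Str.slice tok (some 2) none) "-" "_"

-- B's for-loop: (flags, pending) state, one token at a time.
def pvBLoop : List String → PySem.Dict String String → Option String → PySem.Dict String String
  | [], flags, _ => flags
  | tok :: rest, flags, pending =>
    match pending with
    | some key => pvBLoop rest (flags.insert key tok) none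
    | none =>
      if pvKnownFlags.contains tok then pvBLoop rest flags (some (pvKeyOf tok))
      else pvBLoop rest flags none

def parse_flags_alt (argv : List String) : List (String × String) :=
  (pvBLoop argv PySem.Dict.empty none).items

-- ===== PRECONDITION & SPEC =====
def Spec_parse_flags (argv : List String) (out : List (String × String)) : Prop := out = parse_flags_alt argv
instance (argv : List String) (out : List (String × String)) : Decidable (Spec_parse_flags argv out) := by unfold Spec_parse_flags; infer_instance

-- ===== CLAIM (what is proved, stated in full; the proofs are below) =====
def Claim_equal_parse_flags : Prop := ∀ (argv : List String), Dom_parse_flags argv → Spec_parse_flags argv (parse_flags argv)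

-- ===== LEMMAS AND PROOFS =====
-- First-match lookup in a pair list whose values are all pvKeyOf of their keys.
theorem pvLookup_aux (l : List (String × String)) (h : ∀ p ∈ l, p.2 = pvKeyOf p.1) (a : String) :
    (PySem.Dict.mk l).get? a = if (l.map Prod.fst).contains a then some (pvKeyOf a) else none := by
  induction l with
  | nil => simp [PySem.Dict.get?]
  | cons p rest ih =>
    obtain ⟨k, v⟩ := p
    rw [PySem.Dict.get?_mk_cons, ih (fun p hp => h p (List.mem_cons_of_mem _ hp))]
    by_cases hk : k = a
    · have hv : v = pvKeyOf k := h (k, v) List.mem_cons_self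
      subst hk; simp [hv]
    · have hb : (k == a) = false := by simp [hk]
      have hcc : (k :: List.map Prod.fst rest).contains a = (List.map Prod.fst rest).contains a := by
        simp [Ne.symm hk]
      rw [hb, List.map_cons, hcc]
      simp

-- A's flag_map lookup agrees with B's set membership + computed key.
theorem pvLookup_eq (a : String) :
    pvFlagMap.get? a = if pvKnownFlags.contains a then some (pvKeyOf a) else none := by
  have h1 : pvFlagMap = PySem.Dict.mk pvPairs := by decide
  have h2 : ∀ p ∈ pvPairs, p.2 = pvKeyOf p.1 := by decide
  have h3 : (pvKnownFlags : List String) = pvPairs.map Prod.fst := by decide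
  rw [h1, pvLookup_aux pvPairs h2 a, h3]
  rfl

-- One-step unfolding equations for the two loops (definitional).
theorem pvALoop_cons2 (a b : String) (rest : List String) (flags : PySem.Dict String String) :
    pvALoop (a :: b :: rest) flags =
      match pvFlagMap.get? a with
      | some key => pvALoop rest (flags.insert key b)
      | none => pvALoop (b :: rest) flags := rfl

theorem pvBLoop_cons_none (tok : String) (rest : List String) (flags : PySem.Dict String String) :
    pvBLoop (tok :: rest) flags none =
      if pvKnownFlags.contains tok then pvBLoop rest flags (some (pvKeyOf tok))
      else pvBLoop rest flags none := rfl

-- The two loops compute the same dict: strong induction on the suffix length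
-- (A may consume two tokens in one step).
theorem pvLoop_eq (n : Nat) : ∀ (xs : List String), xs.length ≤ n →
    ∀ (flags : PySem.Dict String String), pvBLoop xs flags none = pvALoop xs flags := by
  induction n with
  | zero =>
    intro xs h flags
    cases xs with
    | nil => rfl
    | cons a rest => simp at h
  | succ n ih =>
    intro xs h flags
    cases xs with
    | nil => rfl
    | cons a rest =>
      have hla := pvLookup_eq a
      cases hc : pvKnownFlags.contains a with
      | false =>
        rw [hc, if_neg (by simp)] at hla
        cases rest with
        | nil => rw [pvBLoop_cons_none, hc, if_neg (by simp)]; rfl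
        | cons b rest' =>
          rw [pvBLoop_cons_none, hc, if_neg (by simp), pvALoop_cons2, hla]
          exact ih (b :: rest') (by simp at h ⊢; omega) flags
      | true =>
        rw [hc, if_pos rfl] at hla
        cases rest with
        | nil => rw [pvBLoop_cons_none, hc, if_pos rfl]; rfl
        | cons b rest' =>
          rw [pvBLoop_cons_none, hc, if_pos rfl, pvALoop_cons2, hla]
          exact ih rest' (by simp at h; omega) (flags.insert (pvKeyOf a) b)

-- ===== VERDICT (by name: the statement is the Claim_ definition above) =====
theorem parse_flags_spec : Claim_equal_parse_flags := by
  intro argv _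
  unfold Spec_parse_flags parse_flags parse_flags_alt
  rw [pvLoop_eq argv.length argv (le_refl _)]
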